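-- pv_equiv track=rewrite | github.com/nagaajau/YoutubeSummarization | app.py | clean_text_lines
-- ===== SOURCE A (Python) =====
-- def clean_text_lines(text):
--     lines = text.splitlines()
--     cleaned_lines = []
--     current_line = ""
--
--     for line in lines:
--         line = line.strip()
--         if not line:
--             continue
--         if current_line and line[0].islower() and not current_line[-1] in ".!?":
--             current_line += " " + line  # Append the line if it's a continuation
--         else:
--             if current_line:
--                 cleaned_lines.append(current_line)
--             current_line = line
--
--     if current_line:
--         cleaned_lines.append(current_line)
--
--     return '\n'.join(cleaned_lines)
-- ===== SOURCE B (Python) =====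
-- def clean_text_lines(text):
--     lines = [s for s in (l.strip() for l in text.splitlines()) if s]
--     groups = []
--     for line in lines:
--         if groups and line[0].islower() and groups[-1][-1][-1] not in ".!?":
--             groups[-1].append(line)
--         else:
--             groups.append([line])
--     return '\n'.join(' '.join(g) for g in groups)
-- ===== Notes on version B (the rewrite author's own statement) =====
-- stated objective: alternative
-- what changed: B collects stripped non-empty lines once, folds them into a list of line groups (appending to the last group for continuations), and joins each group with spaces only at the end, instead of A's running concatenated string with append/flush logic inside the loop.
import Mathlib
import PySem

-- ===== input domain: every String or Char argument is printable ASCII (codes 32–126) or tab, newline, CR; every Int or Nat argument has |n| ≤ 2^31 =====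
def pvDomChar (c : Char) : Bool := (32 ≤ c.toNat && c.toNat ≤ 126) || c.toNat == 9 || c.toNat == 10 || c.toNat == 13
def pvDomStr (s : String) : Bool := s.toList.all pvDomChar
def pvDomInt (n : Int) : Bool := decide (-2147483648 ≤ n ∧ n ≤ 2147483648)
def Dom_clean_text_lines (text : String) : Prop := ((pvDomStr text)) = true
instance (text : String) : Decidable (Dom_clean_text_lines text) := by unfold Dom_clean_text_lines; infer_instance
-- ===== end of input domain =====

-- B keeps a list of line groups and joins once at the end, instead of A's running
-- concatenated string with flush logic; same output (objective: alternative decomposition).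

-- ===== PORT A =====
-- one iteration of A's loop over raw lines; state = (cleaned_lines, current_line)
def cleanStepA (st : List (List Char) × List Char) (raw : List Char) :
    List (List Char) × List Char :=
  let line := PySem.Chars.strip raw
  if line = [] then st
  else if st.2 ≠ [] ∧ PySem.Chars.islower (line.headD ' ') = true ∧
      st.2.getLastD ' ' ∉ ['.', '!', '?'] then
    (st.1, st.2 ++ [' '] ++ line)                 -- current_line += " " + line
  else
    ((if st.2 ≠ [] then st.1 ++ [st.2] else st.1), line)

def clean_text_lines (text : String) : String :=
  let lines := PySem.Chars.splitlines text.toList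
  let st := lines.foldl cleanStepA ([], [])
  let cleaned := if st.2 ≠ [] then st.1 ++ [st.2] else st.1
  String.ofList (PySem.Chars.join ['\n'] cleaned)

-- ===== PORT B =====
-- one iteration of B's loop over the stripped non-empty lines; state = groups
def cleanStepB (groups : List (List (List Char))) (line : List Char) :
    List (List (List Char)) :=
  if groups ≠ [] ∧ PySem.Chars.islower (line.headD ' ') = true ∧
      ((groups.getLastD []).getLastD []).getLastD ' ' ∉ ['.', '!', '?'] then
    groups.dropLast ++ [groups.getLastD [] ++ [line]]   -- groups[-1].append(line)
  else
    groups ++ [[line]]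

def clean_text_lines_alt (text : String) : String :=
  let lines := ((PySem.Chars.splitlines text.toList).map PySem.Chars.strip).filter
      (fun l => !l.isEmpty)
  let groups := lines.foldl cleanStepB []
  String.ofList (PySem.Chars.join ['\n'] (groups.map (PySem.Chars.join [' '])))

-- ===== PRECONDITION & SPEC =====
def Spec_clean_text_lines (text : String) (out : String) : Prop := out = clean_text_lines_alt text
instance (text : String) (out : String) : Decidable (Spec_clean_text_lines text out) := by unfold Spec_clean_text_lines; infer_instance

-- ===== CLAIM (what is proved, stated in full; the proofs are below) =====
def Claim_equal_clean_text_lines : Prop := ∀ (text : String), Dom_clean_text_lines text → Spec_clean_text_lines text (clean_text_lines text)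

-- ===== LEMMAS AND PROOFS =====

-- A's state as a function of B's state
def absState (groups : List (List (List Char))) : List (List Char) × List Char :=
  ((groups.dropLast).map (PySem.Chars.join [' ']),
    PySem.Chars.join [' '] (groups.getLastD []))

-- A's loop body on an already-stripped, non-empty line (the strip/skip peeled off)
def cleanStepCore (st : List (List Char) × List Char) (line : List Char) :
    List (List Char) × List Char :=
  if st.2 ≠ [] ∧ PySem.Chars.islower (line.headD ' ') = true ∧
      st.2.getLastD ' ' ∉ ['.', '!', '?'] then
    (st.1, st.2 ++ [' '] ++ line)
  else
    ((if st.2 ≠ [] then st.1 ++ [st.2] else st.1), line)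

def GoodGroups (groups : List (List (List Char))) : Prop :=
  ∀ g ∈ groups, g ≠ [] ∧ ∀ l ∈ g, l ≠ []

lemma cleanStepA_eq (st : List (List Char) × List Char) (raw : List Char) :
    cleanStepA st raw =
      if PySem.Chars.strip raw = [] then st else cleanStepCore st (PySem.Chars.strip raw) := by
  simp [cleanStepA, cleanStepCore]

lemma foldA_eq (lines : List (List Char)) (st : List (List Char) × List Char) :
    lines.foldl cleanStepA st =
      ((lines.map PySem.Chars.strip).filter (fun l => !l.isEmpty)).foldl cleanStepCore st := by
  induction lines generalizing st with
  | nil => rfl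
  | cons raw rest ih =>
      simp only [List.foldl_cons, List.map_cons, List.filter_cons, cleanStepA_eq]
      by_cases h : PySem.Chars.strip raw = []
      · simp [h, ih]
      · simp [h, ih]

lemma join_concat (sep l : List Char) (g : List (List Char)) (hg : g ≠ []) :
    PySem.Chars.join sep (g ++ [l]) = PySem.Chars.join sep g ++ sep ++ l := by
  induction g with
  | nil => exact absurd rfl hg
  | cons a t ih =>
      cases t with
      | nil => simp [PySem.Chars.join_singleton, PySem.Chars.join_cons_cons]
      | cons b t' =>
          have : ((a :: b :: t') ++ [l]) = a :: ((b :: t') ++ [l]) := rfl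
          rw [this]
          have h1 : (b :: t') ++ [l] = b :: (t' ++ [l]) := rfl
          rw [h1, PySem.Chars.join_cons_cons, PySem.Chars.join_cons_cons, ← h1,
            ih (by simp)]
          simp

lemma join_ne_nil (g : List (List Char)) (hg : g ≠ []) (hl : ∀ l ∈ g, l ≠ []) :
    PySem.Chars.join [' '] g ≠ [] := by
  cases g with
  | nil => exact absurd rfl hg
  | cons a t =>
      have ha : a ≠ [] := hl a (by simp)
      cases t with
      | nil => simpa [PySem.Chars.join_singleton] using ha
      | cons b t' =>
          rw [PySem.Chars.join_cons_cons]
          simp [ha]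

lemma getLastD_join (g : List (List Char)) (hg : g ≠ []) (hl : ∀ l ∈ g, l ≠ []) (d : Char) :
    (PySem.Chars.join [' '] g).getLastD d = (g.getLastD []).getLastD d := by
  induction g with
  | nil => exact absurd rfl hg
  | cons a t ih =>
      cases t with
      | nil => simp [PySem.Chars.join_singleton]
      | cons b t' =>
          rw [PySem.Chars.join_cons_cons]
          have hjoin : PySem.Chars.join [' '] (b :: t') ≠ [] :=
            join_ne_nil _ (by simp) (fun l hlm => hl l (by simp [hlm]))
          rw [List.getLastD_eq_getLast?, List.getLast?_append_of_ne_nil _ hjoin,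
            ← List.getLastD_eq_getLast?, ih (by simp) (fun l hlm => hl l (by simp [hlm]))]
          simp

lemma getLastD_app {α : Type} (xs : List α) (y : α) (d : α) :
    (xs ++ [y]).getLastD d = y := by
  simp [List.getLastD_eq_getLast?]

lemma stepAgree (groups : List (List (List Char))) (line : List Char)
    (hG : GoodGroups groups) :
    cleanStepCore (absState groups) line = absState (cleanStepB groups line) := by
  rcases List.eq_nil_or_concat groups with rfl | ⟨gs, g, rfl⟩
  · simp [cleanStepCore, cleanStepB, absState, PySem.Chars.join_nil,
      PySem.Chars.join_singleton]
  · simp only [List.concat_eq_append] at hG ⊢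
    have hgmem : g ∈ gs ++ [g] := by simp
    obtain ⟨hgne, hgl⟩ := hG g hgmem
    have hlastD : (gs ++ [g]).getLastD [] = g := getLastD_app _ _ _
    have hcur : (absState (gs ++ [g])).2 = PySem.Chars.join [' '] g := by
      simp [absState]
    have hcurne : (absState (gs ++ [g])).2 ≠ [] := by
      rw [hcur]; exact join_ne_nil g hgne hgl
    have hcurlast : (absState (gs ++ [g])).2.getLastD ' ' = (g.getLastD []).getLastD ' ' := by
      rw [hcur]; exact getLastD_join g hgne hgl ' '
    by_cases hc : PySem.Chars.islower (line.headD ' ') = true ∧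
        (g.getLastD []).getLastD ' ' ∉ (['.', '!', '?'] : List Char)
    · -- continuation branch on both sides
      have hA : cleanStepCore (absState (gs ++ [g])) line =
          ((absState (gs ++ [g])).1, (absState (gs ++ [g])).2 ++ [' '] ++ line) := by
        rw [cleanStepCore, if_pos ⟨hcurne, hc.1, hcurlast ▸ hc.2⟩]
      rw [hA, cleanStepB, if_pos ⟨by simp, hc.1, by rw [hlastD]; exact hc.2⟩]
      simp only [absState, hlastD, List.dropLast_concat, getLastD_app]
      rw [join_concat [' '] line g hgne]
    · -- new-group branch on both sides
      have hA : cleanStepCore (absState (gs ++ [g])) line =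
          ((absState (gs ++ [g])).1 ++ [(absState (gs ++ [g])).2], line) := by
        rw [cleanStepCore, if_neg, if_pos hcurne]
        intro ⟨_, h2, h3⟩
        exact hc ⟨h2, hcurlast ▸ h3⟩
      rw [hA, cleanStepB, if_neg]
      · simp [absState, PySem.Chars.join_singleton]
      · intro ⟨_, h2, h3⟩
        rw [hlastD] at h3
        exact hc ⟨h2, h3⟩

lemma goodStep (groups : List (List (List Char))) (line : List Char)
    (hG : GoodGroups groups) (hline : line ≠ []) :
    GoodGroups (cleanStepB groups line) := by
  rw [cleanStepB]
  split_ifs with h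
  · intro g hg
    rcases List.mem_append.mp hg with hg1 | hg2
    · exact hG g (List.mem_of_mem_dropLast hg1)
    · have : g = groups.getLastD [] ++ [line] := by simpa using hg2
      subst this
      have hne : groups ≠ [] := h.1
      rcases List.eq_nil_or_concat groups with rfl | ⟨gs, g0, rfl⟩
      · exact absurd rfl hne
      · simp only [List.concat_eq_append] at *
        have hlastD : (gs ++ [g0]).getLastD [] = g0 := getLastD_app _ _ _
        rw [hlastD]
        obtain ⟨_, hgl⟩ := hG g0 (by simp)
        refine ⟨by simp, ?_⟩
        intro l hl
        rcases List.mem_append.mp hl with h1 | h2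
        · exact hgl l h1
        · rw [List.mem_singleton.mp h2]; exact hline
  · intro g hg
    rcases List.mem_append.mp hg with hg1 | hg2
    · exact hG g hg1
    · have : g = [line] := by simpa using hg2
      subst this
      exact ⟨by simp, by simpa using hline⟩

lemma fold_agree (lines : List (List Char)) (groups : List (List (List Char)))
    (hl : ∀ l ∈ lines, l ≠ []) (hG : GoodGroups groups) :
    lines.foldl cleanStepCore (absState groups) =
      absState (lines.foldl cleanStepB groups) ∧
      GoodGroups (lines.foldl cleanStepB groups) := by
  induction lines generalizing groups with
  | nil => exact ⟨rfl, hG⟩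
  | cons line rest ih =>
      have hline : line ≠ [] := hl line (by simp)
      have hrest : ∀ l ∈ rest, l ≠ [] := fun l hm => hl l (by simp [hm])
      simp only [List.foldl_cons]
      rw [stepAgree groups line hG]
      exact ih (cleanStepB groups line) hrest (goodStep groups line hG hline)

-- ===== VERDICT (by name: the statement is the Claim_ definition above) =====
theorem clean_text_lines_spec : Claim_equal_clean_text_lines := by
  intro text _
  unfold Spec_clean_text_lines clean_text_lines clean_text_lines_alt
  simp only [foldA_eq]
  set flines := ((PySem.Chars.splitlines text.toList).map PySem.Chars.strip).filter
      (fun l => !l.isEmpty) with hfl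
  have hlns : ∀ l ∈ flines, l ≠ [] := by
    intro l hm
    have := List.of_mem_filter hm
    simpa [List.isEmpty_iff] using this
  have habs0 : absState [] = (([] : List (List Char)), ([] : List Char)) := by
    simp [absState, PySem.Chars.join_nil]
  obtain ⟨heq, hgood⟩ := fold_agree flines [] hlns (by intro g hg; simp at hg)
  rw [← habs0, heq]
  set G := flines.foldl cleanStepB [] with hGdef
  rcases List.eq_nil_or_concat G with hnil | ⟨gs, g, hcat⟩
  · simp [hnil, absState, PySem.Chars.join_nil]
  · rw [List.concat_eq_append] at hcat
    rw [hcat]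
    have hgmem : g ∈ gs ++ [g] := by simp
    obtain ⟨hgne, hgl⟩ := (hcat ▸ hgood) g hgmem
    have hlastD : (gs ++ [g]).getLastD [] = g := getLastD_app _ _ _
    have hcurne : (absState (gs ++ [g])).2 ≠ [] := by
      simp only [absState, hlastD]
      exact join_ne_nil g hgne hgl
    simp only [absState, List.dropLast_concat, hlastD] at hcurne ⊢
    rw [if_pos (join_ne_nil g hgne hgl)]
    simp
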